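-- pv_equiv track=rewrite | github.com/breezy-team/breezy | breezy/graph.py | _remove_simple_descendants
-- ===== SOURCE A (Python) =====
-- def _remove_simple_descendants(revisions, parent_map):
--     """Remove revisions which are children of other ones in the set.
--
--     This doesn't do any graph searching, it just checks the immediate
--     parent_map to find if there are any children which can be removed.
--
--     :param revisions: A set of revision_ids
--     :return: A set of revision_ids with the children removed
--     """
--     simple_ancestors = revisions.copy()
--     # TODO: jam 20071214 we *could* restrict it to searching only the
--     #       parent_map of revisions already present in 'revisions', but
--     #       considering the general use case, I think this is actually
--     #       better.
--
--     # This is the same as the following loop. I don't know that it is any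
--     # faster.
--     # simple_ancestors.difference_update(r for r, p_ids in parent_map.iteritems()
--     # if p_ids is not None and revisions.intersection(p_ids))
--     # return simple_ancestors
--
--     # Yet Another Way, invert the parent map (which can be cached)
--     ## descendants = {}
--     # for revision_id, parent_ids in parent_map.iteritems():
--     # for p_id in parent_ids:
--     ##       descendants.setdefault(p_id, []).append(revision_id)
--     # for revision in revisions.intersection(descendants):
--     # simple_ancestors.difference_update(descendants[revision])
--     # return simple_ancestors
--     for revision, parent_ids in parent_map.items():
--         if parent_ids is None:
--             continue
--         for parent_id in parent_ids:
--             if parent_id in revisions: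
--                 # This node has a parent present in the set, so we can
--                 # remove it
--                 simple_ancestors.discard(revision)
--                 break
--     return simple_ancestors
-- ===== SOURCE B (Python) =====
-- def _remove_simple_descendants(revisions, parent_map):
--     """Remove revisions which are children of other ones in the set.
--
--     Instead of scanning every edge of parent_map and discarding children,
--     keep exactly the revisions whose own parent list (looked up directly
--     in parent_map) contains no member of the set.
--     """
--     def _has_present_parent(rev):
--         parent_ids = parent_map.get(rev)
--         if parent_ids is None:
--             return False
--         return any(p in revisions for p in parent_ids)
--
--     return {rev for rev in revisions if not _has_present_parent(rev)}
-- ===== Notes on version B (the rewrite author's own statement) =====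
-- stated objective: simpler
-- what changed: Instead of scanning every parent_map edge and discarding children from a copy, B filters the revision set itself, keeping each revision only if a direct parent_map.get lookup shows none of its parents is in the set.
import Mathlib
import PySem

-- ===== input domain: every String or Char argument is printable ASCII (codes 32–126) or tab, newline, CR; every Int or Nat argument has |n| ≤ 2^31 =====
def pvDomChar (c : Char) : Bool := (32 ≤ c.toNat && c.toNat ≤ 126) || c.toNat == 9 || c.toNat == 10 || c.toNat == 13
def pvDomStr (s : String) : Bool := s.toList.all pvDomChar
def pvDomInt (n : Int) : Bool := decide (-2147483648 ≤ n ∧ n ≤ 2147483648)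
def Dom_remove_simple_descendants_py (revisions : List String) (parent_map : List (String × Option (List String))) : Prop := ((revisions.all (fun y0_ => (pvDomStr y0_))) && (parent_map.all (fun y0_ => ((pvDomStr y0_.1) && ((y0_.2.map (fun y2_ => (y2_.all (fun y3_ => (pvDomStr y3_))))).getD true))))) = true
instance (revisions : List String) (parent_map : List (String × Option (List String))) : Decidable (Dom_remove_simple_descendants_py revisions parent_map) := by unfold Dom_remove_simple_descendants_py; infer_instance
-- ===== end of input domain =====

-- B keeps each revision whose direct parent_map lookup shows no parent in the set,
-- instead of A's edge scan with discards. Return-value equivalence only (neither mutates).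

-- ===== PORT A =====
-- inner 'for parent_id in parent_ids: if parent_id in revisions: discard; break'
def pvInnerA (revisions : List String) (rev : String) (sa : PySem.Set String) :
    List String → PySem.Set String
  | [] => sa
  | p :: ps =>
    if PySem.Set.contains revisions p then PySem.Set.discard sa rev
    else pvInnerA revisions rev sa ps

def remove_simple_descendants_py (revisions : List String)
    (parent_map : List (String × Option (List String))) : List String :=
  parent_map.foldl (fun sa rp =>
    match rp.2 with
    | none => sa
    | some parent_ids => pvInnerA revisions rp.1 sa parent_ids) revisions

-- ===== PORT B =====
-- parent_map.get(rev): first match in the association list (dict lookup)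
def pvHasPresentParent (revisions : List String)
    (parent_map : List (String × Option (List String))) (rev : String) : Bool :=
  match (parent_map.find? (fun p => p.1 == rev)).map (·.2) with
  | some (some parent_ids) => parent_ids.any (fun p => PySem.Set.contains revisions p)
  | _ => false

def remove_simple_descendants_py_alt (revisions : List String)
    (parent_map : List (String × Option (List String))) : List String :=
  revisions.filter (fun rev => !pvHasPresentParent revisions parent_map rev)

-- ===== PRECONDITION & SPEC =====
-- parent_map is a Python dict, whose keys are necessarily distinct; the association-list
-- encoding also admits duplicate keys, which no Python input can produce, so Pre_ excludes them.
def Pre_remove_simple_descendants_py (revisions : List String) (parent_map : List (String × Option (List String))) : Prop :=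
  (parent_map.map Prod.fst).Nodup
instance (revisions : List String) (parent_map : List (String × Option (List String))) : Decidable (Pre_remove_simple_descendants_py revisions parent_map) := by unfold Pre_remove_simple_descendants_py; infer_instance

def pvWitness_remove_simple_descendants_py : List String × (List (String × Option (List String))) :=
  (["a", "b", "c"], [("b", some ["a"]), ("c", some ["x"]), ("d", none)])

def Spec_remove_simple_descendants_py (revisions : List String) (parent_map : List (String × Option (List String))) (out : List String) : Prop := out = remove_simple_descendants_py_alt revisions parent_map
instance (revisions : List String) (parent_map : List (String × Option (List String))) (out : List String) : Decidable (Spec_remove_simple_descendants_py revisions parent_map out) := by unfold Spec_remove_simple_descendants_py; infer_instance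

-- ===== CLAIM (what is proved, stated in full; the proofs are below) =====
def Claim_equal_remove_simple_descendants_py : Prop := ∀ (revisions : List String) (parent_map : List (String × Option (List String))), Dom_remove_simple_descendants_py revisions parent_map → Pre_remove_simple_descendants_py revisions parent_map → Spec_remove_simple_descendants_py revisions parent_map (remove_simple_descendants_py revisions parent_map)

-- ===== LEMMAS AND PROOFS =====

-- A's inner loop is a conditional discard.
theorem pvInnerA_eq (revisions : List String) (rev : String) (sa : PySem.Set String)
    (ps : List String) :
    pvInnerA revisions rev sa ps =
      if ps.any (fun p => PySem.Set.contains revisions p)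
      then PySem.Set.discard sa rev else sa := by
  induction ps with
  | nil => simp [pvInnerA]
  | cons p ps ih =>
    by_cases h : p ∈ revisions <;>
      simp [pvInnerA, ih, PySem.Set.contains, h]

-- with no entry for key k, the lookup misses
theorem pvHPP_of_not_key (revisions : List String)
    (pm : List (String × Option (List String))) (k : String)
    (hk : k ∉ pm.map Prod.fst) :
    pvHasPresentParent revisions pm k = false := by
  unfold pvHasPresentParent
  have : pm.find? (fun p => p.1 == k) = none := by
    rw [List.find?_eq_none]
    intro x hx hbeq
    exact hk (List.mem_map.mpr ⟨x, hx, by simpa using hbeq⟩)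
  simp [this]

-- first-match lookup on a cons
theorem pvHPP_cons (revisions : List String) (e : String × Option (List String))
    (pm : List (String × Option (List String))) (x : String) :
    pvHasPresentParent revisions (e :: pm) x =
      if x = e.1 then
        (match e.2 with
         | some ps => ps.any (fun p => PySem.Set.contains revisions p)
         | none => false)
      else pvHasPresentParent revisions pm x := by
  unfold pvHasPresentParent
  by_cases h : e.1 = x
  · subst h
    simp [List.find?_cons_of_pos]
    cases e.2 <;> rfl
  · have h' : x ≠ e.1 := fun hx => h hx.symm
    have hbeq : (e.1 == x) = false := by simpa using h
    simp [hbeq, h']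

-- main loop invariant: A's fold over the map filters out exactly the revisions B rejects
theorem pvLoopA_eq (revisions : List String) :
    ∀ (pm : List (String × Option (List String))) (sa : List String),
      (pm.map Prod.fst).Nodup →
      pm.foldl (fun sa rp =>
        match rp.2 with
        | none => sa
        | some parent_ids => pvInnerA revisions rp.1 sa parent_ids) sa =
      sa.filter (fun x => !pvHasPresentParent revisions pm x) := by
  intro pm
  induction pm with
  | nil =>
    intro sa _
    simp [pvHasPresentParent]
  | cons e pm ih =>
    intro sa hnd
    have h2 : (e.1 :: pm.map Prod.fst).Nodup := by simpa using hnd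
    have hk : e.1 ∉ pm.map Prod.fst := (List.nodup_cons.mp h2).1
    have hnd' : (pm.map Prod.fst).Nodup := (List.nodup_cons.mp h2).2
    have hmiss := pvHPP_of_not_key revisions pm e.1 hk
    rw [List.foldl_cons]
    cases hv : e.2 with
    | none =>
      rw [ih _ hnd']
      apply List.filter_congr
      intro x _
      rw [pvHPP_cons]
      by_cases hx : x = e.1
      · subst hx; simp [hv, hmiss]
      · simp [hx]
    | some ps =>
      rw [ih _ hnd']
      dsimp only
      by_cases hc : ps.any (fun p => PySem.Set.contains revisions p) = true
      · have hc' : ∃ x ∈ ps, x ∈ revisions := by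
          simpa [PySem.Set.contains] using hc
        rw [pvInnerA_eq, if_pos hc]
        unfold PySem.Set.discard
        rw [List.filter_filter]
        apply List.filter_congr
        intro x _
        rw [pvHPP_cons]
        by_cases hx : x = e.1
        · subst hx; simp [hv, hc']
        · simp [hx]
      · have hc' : ∀ x ∈ ps, x ∉ revisions := by
          simpa [PySem.Set.contains] using hc
        rw [pvInnerA_eq, if_neg hc]
        apply List.filter_congr
        intro x _
        rw [pvHPP_cons]
        by_cases hx : x = e.1
        · subst hx
          simp [hv, hmiss]
          exact hc'
        · simp [hx]

-- ===== VERDICT (by name: the statement is the Claim_ definition above) =====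
theorem remove_simple_descendants_py_spec : Claim_equal_remove_simple_descendants_py := by
  intro revisions parent_map _ hpre
  unfold Spec_remove_simple_descendants_py
  unfold remove_simple_descendants_py remove_simple_descendants_py_alt
  exact pvLoopA_eq revisions parent_map revisions hpre
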